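-- pv_equiv track=rewrite | github.com/dylanlmeraki/Inspections_OS | mirror-pack-agent/acquisition/engine.py | choose_primary_attempt
-- ===== SOURCE A (Python) =====
-- from typing import Any
--
-- def choose_primary_attempt(attempts: list[dict[str, Any]]) -> dict[str, Any]:
--     if not attempts:
--         return {}
--     for preferred_status in (
--         "direct_mirror_downloaded",
--         "source_reference_verified",
--         "html_page_snapshotted",
--         "pdf_link_discovered_not_downloaded",
--         "requires_manual_login",
--         "requires_manual_review",
--         "ambiguous_source",
--         "superseded_source",
--         "obsolete_source",
--         "http_error",
--         "wrong_content_type",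
--         "fetch_failed",
--     ):
--         for attempt in attempts:
--             if attempt.get("status") == preferred_status:
--                 return attempt
--     return attempts[0]
-- ===== SOURCE B (Python) =====
-- def choose_primary_attempt(attempts: list[dict[str, "Any"]]) -> dict[str, "Any"]:
--     if not attempts:
--         return {}
--     order = (
--         "direct_mirror_downloaded",
--         "source_reference_verified",
--         "html_page_snapshotted",
--         "pdf_link_discovered_not_downloaded",
--         "requires_manual_login",
--         "requires_manual_review",
--         "ambiguous_source",
--         "superseded_source",
--         "obsolete_source",
--         "http_error",
--         "wrong_content_type",
--         "fetch_failed",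
--     )
--     rank = {status: i for i, status in enumerate(order)}
--     unknown = len(order)
--     best = attempts[0]
--     best_rank = rank.get(best.get("status"), unknown)
--     for attempt in attempts[1:]:
--         r = rank.get(attempt.get("status"), unknown)
--         if r < best_rank:
--             best, best_rank = attempt, r
--     return best
-- ===== Notes on version B (the rewrite author's own statement) =====
-- stated objective: simpler
-- what changed: Replaces A's 12-pass nested scan (one scan of attempts per status) by a precomputed status->priority dict and a single pass keeping the first attempt of minimal rank, with unknown statuses ranked below all listed ones.
import Mathlib
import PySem

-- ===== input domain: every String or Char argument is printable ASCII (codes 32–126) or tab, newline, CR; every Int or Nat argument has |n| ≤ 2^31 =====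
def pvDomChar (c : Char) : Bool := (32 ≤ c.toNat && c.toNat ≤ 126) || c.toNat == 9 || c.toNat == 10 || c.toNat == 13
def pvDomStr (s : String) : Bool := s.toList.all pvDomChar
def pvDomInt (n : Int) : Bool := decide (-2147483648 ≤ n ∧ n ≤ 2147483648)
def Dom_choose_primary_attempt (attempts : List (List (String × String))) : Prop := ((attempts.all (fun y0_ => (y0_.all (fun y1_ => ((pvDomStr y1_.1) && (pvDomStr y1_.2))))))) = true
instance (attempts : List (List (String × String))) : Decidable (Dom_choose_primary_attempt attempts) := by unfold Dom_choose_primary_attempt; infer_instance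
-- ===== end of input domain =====

-- B replaces A's twelve passes (one scan of attempts per preferred status) by a status→rank
-- dict and one pass keeping the first attempt of minimal rank; return values proved equal.

-- attempt.get("status") (both Pythons perform this same lookup)
def statusGet (a : List (String × String)) : Option String := (PySem.Dict.mk a).get? "status"

-- ===== PORT A =====
-- the tuple of preferred statuses, in A's order
def orderListA : List String :=
  ["direct_mirror_downloaded", "source_reference_verified", "html_page_snapshotted",
   "pdf_link_discovered_not_downloaded", "requires_manual_login", "requires_manual_review",
   "ambiguous_source", "superseded_source", "obsolete_source", "http_error",
   "wrong_content_type", "fetch_failed"]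

-- inner loop: first attempt whose status equals s
def findAttemptA (s : String) : List (List (String × String)) → Option (List (String × String))
  | [] => none
  | a :: rest => if statusGet a == some s then some a else findAttemptA s rest

-- outer loop over the preferred statuses
def goOrderA (attempts : List (List (String × String))) : List String → Option (List (String × String))
  | [] => none
  | s :: os =>
    match findAttemptA s attempts with
    | some a => some a
    | none => goOrderA attempts os

def choose_primary_attempt (attempts : List (List (String × String))) : List (String × String) :=
  if attempts.isEmpty then []
  else
    match goOrderA attempts orderListA with
    | some a => a
    | none => attempts.headD []

-- ===== PORT B =====
-- rank = {status: i for i, status in enumerate(order)}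
def rankDictB : PySem.Dict String Nat :=
  PySem.Dict.mk
    [("direct_mirror_downloaded", 0), ("source_reference_verified", 1), ("html_page_snapshotted", 2),
     ("pdf_link_discovered_not_downloaded", 3), ("requires_manual_login", 4), ("requires_manual_review", 5),
     ("ambiguous_source", 6), ("superseded_source", 7), ("obsolete_source", 8), ("http_error", 9),
     ("wrong_content_type", 10), ("fetch_failed", 11)]

-- rank.get(attempt.get("status"), unknown)  (unknown = len(order) = 12; a missing status is not a key)
def rankOfB (a : List (String × String)) : Nat :=
  match statusGet a with
  | none => 12
  | some s => (rankDictB.get? s).getD 12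

def choose_primary_attempt_alt (attempts : List (List (String × String))) : List (String × String) :=
  match attempts with
  | [] => []
  | a0 :: rest =>
    (rest.foldl
      (fun best a => if rankOfB a < best.2 then (a, rankOfB a) else best)
      (a0, rankOfB a0)).1

-- ===== PRECONDITION & SPEC =====
def Spec_choose_primary_attempt (attempts : List (List (String × String))) (out : List (String × String)) : Prop := out = choose_primary_attempt_alt attempts
instance (attempts : List (List (String × String))) (out : List (String × String)) : Decidable (Spec_choose_primary_attempt attempts out) := by unfold Spec_choose_primary_attempt; infer_instance

-- ===== CLAIM (what is proved, stated in full; the proofs are below) =====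
def Claim_equal_choose_primary_attempt : Prop := ∀ (attempts : List (List (String × String))), Dom_choose_primary_attempt attempts → Spec_choose_primary_attempt attempts (choose_primary_attempt attempts)

-- ===== LEMMAS AND PROOFS =====

-- index of the first status of os matched by s (= os.length when s matches none)
def idxIn : List String → String → Nat
  | [], _ => 0
  | t :: os, s => if s = t then 0 else 1 + idxIn os s

-- rank of an attempt relative to a status list
def rkIn (os : List String) (a : List (String × String)) : Nat :=
  match statusGet a with
  | none => os.length
  | some s => idxIn os s

-- minimum rank over a list of attempts (base os.length is harmless: every rank ≤ os.length)
def minRk (os : List String) (l : List (List (String × String))) : Nat :=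
  (l.map (rkIn os)).foldr min os.length

-- B's loop, as a named function of the rank function (definitionally B's foldl)
def foldB {α : Type} (r : α → Nat) (l : List α) (b : α) : α × Nat :=
  l.foldl (fun best a => if r a < best.2 then (a, r a) else best) (b, r b)

theorem idxIn_le (os : List String) (s : String) : idxIn os s ≤ os.length := by
  induction os with
  | nil => simp [idxIn]
  | cons t os ih => by_cases h : s = t <;> simp [idxIn, h] <;> omega

theorem rkIn_le (os : List String) (a : List (String × String)) : rkIn os a ≤ os.length := by
  unfold rkIn; cases statusGet a with
  | none => exact le_rfl
  | some s => exact idxIn_le os s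

theorem rkIn_cons (s : String) (os : List String) (a : List (String × String)) :
    rkIn (s :: os) a = if statusGet a == some s then 0 else 1 + rkIn os a := by
  unfold rkIn
  cases statusGet a with
  | none => simp [idxIn]; omega
  | some t =>
    by_cases h : t = s
    · simp [idxIn, h]
    · simp [idxIn, h]

theorem rankOfB_eq (a : List (String × String)) : rankOfB a = rkIn orderListA a := by
  unfold rankOfB rkIn
  cases statusGet a with
  | none => rfl
  | some s =>
    show (rankDictB.get? s).getD 12 = idxIn orderListA s
    by_cases h1 : s = "direct_mirror_downloaded"
    · subst h1; decide
    by_cases h2 : s = "source_reference_verified"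
    · subst h2; decide
    by_cases h3 : s = "html_page_snapshotted"
    · subst h3; decide
    by_cases h4 : s = "pdf_link_discovered_not_downloaded"
    · subst h4; decide
    by_cases h5 : s = "requires_manual_login"
    · subst h5; decide
    by_cases h6 : s = "requires_manual_review"
    · subst h6; decide
    by_cases h7 : s = "ambiguous_source"
    · subst h7; decide
    by_cases h8 : s = "superseded_source"
    · subst h8; decide
    by_cases h9 : s = "obsolete_source"
    · subst h9; decide
    by_cases h10 : s = "http_error"
    · subst h10; decide
    by_cases h11 : s = "wrong_content_type"
    · subst h11; decide
    by_cases h12 : s = "fetch_failed"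
    · subst h12; decide
    simp [rankDictB, orderListA, PySem.Dict.get?_mk_cons, PySem.Dict.get?, idxIn, h1, h2, h3, h4, h5, h6, h7, h8, h9, h10, h11, h12, Ne.symm h1, Ne.symm h2, Ne.symm h3, Ne.symm h4, Ne.symm h5, Ne.symm h6, Ne.symm h7, Ne.symm h8, Ne.symm h9, Ne.symm h10, Ne.symm h11, Ne.symm h12]

theorem minRk_le_mem (os : List String) :
    ∀ {l : List (List (String × String))} {a : List (String × String)},
      a ∈ l → minRk os l ≤ rkIn os a
  | [], _, h => absurd h (List.not_mem_nil)
  | b :: t, a, h => by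
    rcases List.mem_cons.mp h with h | h
    · simp only [minRk, List.map, List.foldr, h]; exact min_le_left _ _
    · have := minRk_le_mem os h
      simp only [minRk, List.map, List.foldr] at this ⊢
      exact le_trans (min_le_right _ _) this

theorem find?_congr_mem {α : Type} {p q : α → Bool} :
    ∀ (l : List α), (∀ a ∈ l, p a = q a) → l.find? p = l.find? q
  | [], _ => rfl
  | a :: t, h => by
    have ha := h a (by simp)
    simp only [List.find?, ha]
    cases q a with
    | true => rfl
    | false => exact find?_congr_mem t (fun x hx => h x (by simp [hx]))

theorem findAttemptA_eq (s : String) (l : List (List (String × String))) :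
    findAttemptA s l = l.find? (fun a => statusGet a == some s) := by
  induction l with
  | nil => rfl
  | cons a t ih =>
    simp only [findAttemptA, List.find?]
    cases h : (statusGet a == some s) <;> simp [h, ih]

theorem foldr_min_map_succ {α : Type} {f g : α → Nat} (c : Nat) :
    ∀ l : List α, (∀ b ∈ l, f b = 1 + g b) →
      (l.map f).foldr min (1 + c) = 1 + (l.map g).foldr min c
  | [], _ => rfl
  | b :: t, h => by
    have hb := h b (by simp)
    have ht := foldr_min_map_succ c t (fun x hx => h x (by simp [hx]))
    simp only [List.map, List.foldr, hb, ht]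
    omega

-- A's nested loops return the first attempt of minimal rank, when that rank is a listed one
theorem goOrderA_spec (os : List String) :
    ∀ l, goOrderA l os =
      if minRk os l < os.length then l.find? (fun a => rkIn os a == minRk os l) else none := by
  induction os with
  | nil => intro l; simp [goOrderA, minRk]
  | cons s os ih =>
    intro l
    have hgo : goOrderA l (s :: os) =
        match l.find? (fun a => statusGet a == some s) with
        | some a => some a
        | none => goOrderA l os := by
      rw [goOrderA, findAttemptA_eq]
    cases hf : l.find? (fun a => statusGet a == some s) with
    | some a =>
      simp only [hgo, hf]
      have hmem : a ∈ l := List.mem_of_find?_eq_some hf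
      have hpa : (statusGet a == some s) = true :=
        List.find?_some (p := fun a => statusGet a == some s) hf
      have hrk0 : rkIn (s :: os) a = 0 := by rw [rkIn_cons, hpa]; rfl
      have hmin : minRk (s :: os) l = 0 :=
        Nat.le_zero.mp (hrk0 ▸ minRk_le_mem (s :: os) hmem)
      rw [hmin, if_pos (by simp)]
      rw [← hf]
      apply find?_congr_mem
      intro b _
      rw [rkIn_cons]
      cases h : (statusGet b == some s) <;> simp [h]
    | none =>
      simp only [hgo, hf]
      have hall : ∀ b ∈ l, (statusGet b == some s) = false := by
        intro b hb
        have := List.find?_eq_none.mp hf b hb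
        simpa using this
      have hrk : ∀ b ∈ l, rkIn (s :: os) b = 1 + rkIn os b := by
        intro b hb; rw [rkIn_cons, hall b hb]; rfl
      have hmin : minRk (s :: os) l = 1 + minRk os l := by
        unfold minRk
        have hlen : (s :: os).length = 1 + os.length := by simp; omega
        rw [hlen]
        exact foldr_min_map_succ os.length l hrk
      rw [hmin, ih l]
      by_cases hc : minRk os l < os.length
      · have hc' : 1 + minRk os l < (s :: os).length := by simp; omega
        rw [if_pos hc, if_pos hc']
        apply find?_congr_mem
        intro b hb
        simp only [hrk b hb]
        by_cases h : rkIn os b = minRk os l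
        · simp [h]
        · have h1 : ¬ ((1:Nat) + rkIn os b = 1 + minRk os l) := by omega
          simp [h, h1]
      · have hc' : ¬ (1 + minRk os l < (s :: os).length) := by simp; omega
        rw [if_neg hc, if_neg hc']

theorem foldl_min_le_init : ∀ (xs : List Nat) (x : Nat), xs.foldl min x ≤ x
  | [], _ => le_rfl
  | h :: t, x => by
    simp only [List.foldl]
    exact le_trans (foldl_min_le_init t (min x h)) (min_le_left _ _)

theorem foldl_min_eq_foldr : ∀ (xs : List Nat) (x c : Nat), x ≤ c →
    xs.foldl min x = min x (xs.foldr min c)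
  | [], x, c, h => by simp [Nat.min_eq_left h]
  | a :: t, x, c, h => by
    simp only [List.foldl, List.foldr]
    rw [foldl_min_eq_foldr t (min x a) c (le_trans (min_le_left _ _) h)]
    omega

-- B's fold keeps the minimal rank and the FIRST attempt attaining it
theorem fold_min_spec {α : Type} (r : α → Nat) :
    ∀ (l : List α) (b : α),
      (foldB r l b).2 = (l.map r).foldl min (r b) ∧
      (b :: l).find? (fun a => r a == (foldB r l b).2) = some (foldB r l b).1
  | [], b => by simp [foldB, List.find?]
  | a :: t, b => by
    by_cases hab : r a < r b
    · have hstep : foldB r (a :: t) b = foldB r t a := by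
        simp [foldB, List.foldl, hab]
      obtain ⟨h2, hf⟩ := fold_min_spec r t a
      refine ⟨?_, ?_⟩
      · rw [hstep, h2]
        simp only [List.map, List.foldl]
        rw [Nat.min_eq_right (le_of_lt hab)]
      · rw [hstep]
        have hle : (foldB r t a).2 ≤ r a := by rw [h2]; exact foldl_min_le_init _ _
        have hb : (r b == (foldB r t a).2) = false := by
          simp only [beq_eq_false_iff_ne, ne_eq]; omega
        simp only [List.find?, hb]
        exact hf
    · have hstep : foldB r (a :: t) b = foldB r t b := by
        simp [foldB, List.foldl, hab]
      obtain ⟨h2, hf⟩ := fold_min_spec r t b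
      have hba : r b ≤ r a := Nat.le_of_not_lt hab
      have hle : (foldB r t b).2 ≤ r b := by rw [h2]; exact foldl_min_le_init _ _
      refine ⟨?_, ?_⟩
      · rw [hstep, h2]
        simp only [List.map, List.foldl]
        rw [Nat.min_eq_left hba]
      · rw [hstep]
        cases hhead : (r b == (foldB r t b).2) with
        | true =>
          have hres : some b = some (foldB r t b).1 := by
            rw [← hf]; simp [List.find?, hhead]
          simp only [List.find?, hhead]
          exact hres
        | false =>
          have hne : r b ≠ (foldB r t b).2 := by simpa using hhead
          have hta : (r a == (foldB r t b).2) = false := by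
            simp only [beq_eq_false_iff_ne, ne_eq]; omega
          have htail : t.find? (fun x => r x == (foldB r t b).2) = some (foldB r t b).1 := by
            have := hf; simpa [List.find?, hhead] using this
          simp only [List.find?, hhead, hta]
          exact htail

-- ===== VERDICT (by name: the statement is the Claim_ definition above) =====
theorem choose_primary_attempt_spec : Claim_equal_choose_primary_attempt := by
  unfold Claim_equal_choose_primary_attempt
  intro attempts _
  unfold Spec_choose_primary_attempt
  cases attempts with
  | nil => rfl
  | cons a0 rest =>
    have hrfun : rankOfB = rkIn orderListA := funext rankOfB_eq
    have hBdef : choose_primary_attempt_alt (a0 :: rest) = (foldB (rkIn orderListA) rest a0).1 := by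
      simp only [choose_primary_attempt_alt, foldB, hrfun]
    obtain ⟨h2, hf⟩ := fold_min_spec (rkIn orderListA) rest a0
    have hlen12 : orderListA.length = 12 := by decide
    have hm : (foldB (rkIn orderListA) rest a0).2 = minRk orderListA (a0 :: rest) := by
      rw [h2]
      unfold minRk
      simp only [List.map, List.foldr]
      rw [foldl_min_eq_foldr (rest.map (rkIn orderListA)) (rkIn orderListA a0)
            orderListA.length (rkIn_le _ _)]
    rw [hm] at hf
    have hA : choose_primary_attempt (a0 :: rest)
        = match goOrderA (a0 :: rest) orderListA with
          | some a => a
          | none => a0 := by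
      simp [choose_primary_attempt]
    rw [hA, goOrderA_spec orderListA (a0 :: rest), hBdef]
    by_cases hc : minRk orderListA (a0 :: rest) < orderListA.length
    · rw [if_pos hc]
      simp only [hf]
    · rw [if_neg hc]
      -- every rank is ≤ 12, so the minimum is 12 and the head already attains it
      have hle0 : rkIn orderListA a0 ≤ orderListA.length := rkIn_le _ _
      have hminle : minRk orderListA (a0 :: rest) ≤ rkIn orderListA a0 :=
        minRk_le_mem _ (by simp)
      have heq : rkIn orderListA a0 = minRk orderListA (a0 :: rest) := by omega
      have hhead : (rkIn orderListA a0 == minRk orderListA (a0 :: rest)) = true := by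
        simp [heq]
      have : some a0 = some (foldB (rkIn orderListA) rest a0).1 := by
        rw [← hf]; simp [List.find?, hhead]
      exact (Option.some.injEq _ _ ▸ this)
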